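-- pv_equiv track=rewrite | github.com/DancingOnAir/LeetcodePythonSolution | String/2167_minimum_time_to_remove_all_cars_containing_illegal_goods.py | minimumTime1
-- ===== SOURCE A (Python) =====
-- def minimumTime1(s: str) -> int:
--     def min_sum(nums):
--         dp = dp_min = float('inf')
--         for num in nums:
--             dp = min(num, dp + num)
--             dp_min = min(dp, dp_min)
--         return min(0, dp_min)
--     return len(s) + min_sum([1 if x == '1' else -1 for x in s])
-- ===== SOURCE B (Python) =====
-- def minimumTime1(s: str) -> int:
--     # prefix-sum formulation: track running prefix sum and its running max;
--     # best split cost delta = min over positions of (p - max earlier prefix)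
--     p = hi = best = 0
--     for x in s:
--         hi = max(hi, p)
--         p += 1 if x == '1' else -1
--         best = min(best, p - hi)
--     return len(s) + best
-- ===== Notes on version B (the rewrite author's own statement) =====
-- stated objective: alternative
-- what changed: Replaces the Kadane min-subarray DP over a pre-built +/-1 list with a single pass over the string maintaining the running prefix sum and its running maximum (best = min of prefix minus earlier max-prefix).
import Mathlib
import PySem

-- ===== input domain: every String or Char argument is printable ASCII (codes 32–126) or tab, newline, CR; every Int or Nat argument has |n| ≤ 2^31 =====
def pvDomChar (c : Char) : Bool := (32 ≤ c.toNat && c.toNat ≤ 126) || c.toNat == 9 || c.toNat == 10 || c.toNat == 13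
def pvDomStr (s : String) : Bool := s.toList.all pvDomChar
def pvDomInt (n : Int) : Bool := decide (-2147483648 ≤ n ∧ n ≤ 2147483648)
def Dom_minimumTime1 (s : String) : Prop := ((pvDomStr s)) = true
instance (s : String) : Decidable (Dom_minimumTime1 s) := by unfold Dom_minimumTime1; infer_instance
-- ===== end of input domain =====

-- B replaces the Kadane ±1 min-subarray DP with a prefix-sum pass tracking the running
-- maximum prefix; same O(n) cost, different maintained state (objective: alternative).


-- ===== PORT A =====
-- inner min_sum: dp / dp_min start at float('inf'); 'none' models infinity exactly
-- (dp = min(num, inf+num) = num, dp_min = min(dp, inf) = dp, min(0, inf) = 0)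
def pvStepA (st : Option Int × Option Int) (num : Int) : Option Int × Option Int :=
  let dp : Int := match st.1 with
    | none => num
    | some d => min num (d + num)
  let dpMin : Int := match st.2 with
    | none => dp
    | some m => min dp m
  (some dp, some dpMin)

def pvMinSum (nums : List Int) : Int :=
  match (nums.foldl pvStepA (none, none)).2 with
  | none => 0
  | some m => min 0 m

def minimumTime1 (s : String) : Int :=
  PySem.Str.len s + pvMinSum (s.toList.map (fun x => if x = '1' then (1 : Int) else -1))

-- ===== PORT B =====
def pvStepB (st : Int × Int × Int) (x : Char) : Int × Int × Int :=
  let hi := max st.2.1 st.1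
  let p := st.1 + (if x = '1' then (1 : Int) else -1)
  (p, hi, min st.2.2 (p - hi))

def minimumTime1_alt (s : String) : Int :=
  PySem.Str.len s + (s.toList.foldl pvStepB (0, 0, 0)).2.2

-- ===== PRECONDITION & SPEC =====
def Spec_minimumTime1 (s : String) (out : Int) : Prop := out = minimumTime1_alt s
instance (s : String) (out : Int) : Decidable (Spec_minimumTime1 s out) := by unfold Spec_minimumTime1; infer_instance

-- ===== CLAIM (what is proved, stated in full; the proofs are below) =====
def Claim_equal_minimumTime1 : Prop := ∀ (s : String), Dom_minimumTime1 s → Spec_minimumTime1 s (minimumTime1 s)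

-- ===== LEMMAS AND PROOFS =====

-- invariant: if dp = p - hi, then A's folded min(0, dp_min) equals B's folded best
lemma pv_fold_eq (l : List Char) : ∀ (p hi dp dpMin : Int), dp = p - hi →
    (match (((l.map (fun x => if x = '1' then (1 : Int) else -1)).foldl pvStepA
        (some dp, some dpMin)).2) with
      | none => (0 : Int)
      | some m => min 0 m)
    = (l.foldl pvStepB (p, hi, min 0 dpMin)).2.2 := by
  induction l with
  | nil => intro p hi dp dpMin h; simp
  | cons c t ih =>
    intro p hi dp dpMin h
    simp only [List.map_cons, List.foldl_cons, pvStepA, pvStepB]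
    have hdp : min (if c = '1' then (1 : Int) else -1) (dp + (if c = '1' then (1 : Int) else -1))
        = (p + (if c = '1' then (1 : Int) else -1)) - max hi p := by
      rcases le_total hi p with h1 | h1 <;> simp [h1] <;> omega
    have hbest : min 0 (min (min (if c = '1' then (1 : Int) else -1)
        (dp + (if c = '1' then (1 : Int) else -1))) dpMin)
        = min (min 0 dpMin)
            ((p + (if c = '1' then (1 : Int) else -1)) - max hi p) := by
      rw [hdp]; omega
    have := ih (p + (if c = '1' then (1 : Int) else -1)) (max hi p)
      (min (if c = '1' then (1 : Int) else -1) (dp + (if c = '1' then (1 : Int) else -1)))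
      (min (min (if c = '1' then (1 : Int) else -1) (dp + (if c = '1' then (1 : Int) else -1))) dpMin)
      hdp
    rw [hbest] at this
    simpa using this

-- ===== VERDICT (by name: the statement is the Claim_ definition above) =====
theorem minimumTime1_spec : Claim_equal_minimumTime1 := by
  intro s _
  unfold Spec_minimumTime1 minimumTime1 minimumTime1_alt pvMinSum
  cases hl : s.toList with
  | nil => simp [hl]
  | cons c t =>
    have h := pv_fold_eq t (if c = '1' then (1 : Int) else -1) 0
      (if c = '1' then (1 : Int) else -1) (if c = '1' then (1 : Int) else -1) (by ring)
    simp only [List.map_cons, List.foldl_cons, pvStepA, pvStepB]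
    congr 1
    simpa using h
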